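-- pv_equiv track=rewrite | github.com/ucfcbb/RNAMotifModule | stats.py | get_shorter_tuple_with_counter
-- ===== SOURCE A (Python) =====
-- from collections import Counter
--
-- def get_shorter_tuple_with_counter(family_group_tuple):
-- 	family_group = list(family_group_tuple)
-- 	shortcoded_numbered_list = []
-- 	counter = Counter()
-- 	for fam in family_group:
-- 		counter[fam] += 1
-- 	counter = dict(counter)
-- 	for fam in sorted(counter):
-- 		shortcoded_numbered_list.append(str(counter[fam]) + fam)
-- 	return tuple(shortcoded_numbered_list)
-- ===== SOURCE B (Python) =====
-- def get_shorter_tuple_with_counter(family_group_tuple):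
--     fams = sorted(family_group_tuple)
--     out = []
--     i = 0
--     n = len(fams)
--     while i < n:
--         j = i + 1
--         while j < n and fams[j] == fams[i]:
--             j += 1
--         out.append(str(j - i) + fams[i])
--         i = j
--     return tuple(out)
-- ===== Notes on version B (the rewrite author's own statement) =====
-- stated objective: alternative
-- what changed: Replaces the Counter/dict tally plus sort-of-keys with a sort-first pass: sort the input once and run-length-encode consecutive equal families in a single scan, no table at all.
import Mathlib
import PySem

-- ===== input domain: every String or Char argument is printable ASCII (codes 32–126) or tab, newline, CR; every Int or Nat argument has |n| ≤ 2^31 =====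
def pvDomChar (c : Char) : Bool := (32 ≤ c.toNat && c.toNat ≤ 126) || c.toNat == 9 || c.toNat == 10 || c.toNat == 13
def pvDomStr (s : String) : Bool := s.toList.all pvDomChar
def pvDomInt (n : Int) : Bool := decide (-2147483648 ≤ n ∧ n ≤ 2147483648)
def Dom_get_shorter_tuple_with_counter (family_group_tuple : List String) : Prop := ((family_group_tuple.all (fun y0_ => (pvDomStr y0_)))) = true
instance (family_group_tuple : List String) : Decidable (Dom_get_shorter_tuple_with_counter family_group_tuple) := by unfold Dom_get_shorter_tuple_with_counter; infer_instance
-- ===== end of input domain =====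

-- B replaces A's Counter-table-then-sorted-keys structure with sort-first + one
-- run-length-encoding scan of the sorted list (alternative decomposition, same cost).

-- ===== PORT A =====
-- literal port of A: tally into a Counter, then walk sorted(counter) appending str(count)+fam.
-- counter[fam] is ported as getD fam 0; fam is always a key of the counter, so it never defaults.
def get_shorter_tuple_with_counter (family_group_tuple : List String) : List String :=
  let family_group := family_group_tuple
  let counter : PySem.Dict String Int :=
    family_group.foldl (fun d fam => d.modify fam 0 (· + 1)) PySem.Dict.empty
  (PySem.List.sorted counter.keys (fun x => x) false).foldl
    (fun acc fam => acc ++ [PySem.Int.toStr (counter.getD fam 0) ++ fam]) []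

-- ===== PORT B =====
-- port of Source B's outer while loop: each step consumes one maximal run fams[i..j) of the
-- sorted list (the inner while j scan is the takeWhile; i = j is the dropWhile) and emits
-- str(j - i) + fams[i].
def pvRunsB : List String → List String
  | [] => []
  | a :: rest =>
      (PySem.Int.toStr (((1 + (rest.takeWhile (fun x => x == a)).length : Nat) : Int)) ++ a)
        :: pvRunsB (rest.dropWhile (fun x => x == a))
termination_by l => l.length
decreasing_by
  have := List.length_dropWhile_le (fun x => x == a) rest
  simp only [List.length_cons]; omega

def get_shorter_tuple_with_counter_alt (family_group_tuple : List String) : List String :=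
  pvRunsB (PySem.List.sorted family_group_tuple (fun x => x) false)

-- ===== PRECONDITION & SPEC =====
def Spec_get_shorter_tuple_with_counter (family_group_tuple : List String) (out : List String) : Prop := out = get_shorter_tuple_with_counter_alt family_group_tuple
instance (family_group_tuple : List String) (out : List String) : Decidable (Spec_get_shorter_tuple_with_counter family_group_tuple out) := by unfold Spec_get_shorter_tuple_with_counter; infer_instance

-- ===== CLAIM (what is proved, stated in full; the proofs are below) =====
def Claim_equal_get_shorter_tuple_with_counter : Prop := ∀ (family_group_tuple : List String), Dom_get_shorter_tuple_with_counter family_group_tuple → Spec_get_shorter_tuple_with_counter family_group_tuple (get_shorter_tuple_with_counter family_group_tuple)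

-- ===== LEMMAS AND PROOFS =====

-- elements surviving dropWhile (== a) in a sorted list all exceed a
lemma pv_drop_gt : ∀ (rest : List String) (a : String), rest.Pairwise (· ≤ ·) →
    (∀ x ∈ rest, a ≤ x) → ∀ x ∈ rest.dropWhile (fun y => y == a), a < x := by
  intro rest
  induction rest with
  | nil => intro a _ _ x hx; simp [List.dropWhile] at hx
  | cons b rs ih =>
    intro a hp hb x hx
    by_cases hba : b == a
    · rw [List.dropWhile_cons, if_pos hba] at hx
      exact ih a hp.of_cons (fun y hy => hb y (List.mem_cons_of_mem _ hy)) x hx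
    · rw [List.dropWhile_cons, if_neg hba] at hx
      have hab : a < b := lt_of_le_of_ne (hb b (List.mem_cons_self)) (fun h => hba (beq_iff_eq.mpr h.symm))
      rcases List.mem_cons.1 hx with rfl | hx
      · exact hab
      · exact lt_of_lt_of_le hab ((List.pairwise_cons.1 hp).1 x hx)

-- the heart: on a sorted list, A's "sorted distinct keys mapped to count-prefixed strings"
-- is exactly B's run-length encoding
lemma pv_runs_eq : ∀ (s : List String), s.Pairwise (· ≤ ·) →
    (PySem.List.sorted (PySem.Set.ofList s) (fun x => x) false).map
      (fun k => PySem.Int.toStr ((s.count k : Int)) ++ k) = pvRunsB s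
  | [], _ => by rw [pvRunsB]; rfl
  | a :: rest, hs => by
    have hpair := List.pairwise_cons.1 hs
    set t := rest.takeWhile (fun x => x == a) with ht
    set d := rest.dropWhile (fun x => x == a) with hd
    have hrest : rest = t ++ d := (List.takeWhile_append_dropWhile ..).symm
    have htA : ∀ x ∈ t, x = a := by
      intro x hx; simpa using List.mem_takeWhile_imp hx
    have hdgt : ∀ x ∈ d, a < x := pv_drop_gt rest a hpair.2 hpair.1
    have hdp : d.Pairwise (· ≤ ·) := hpair.2.sublist (List.dropWhile_sublist _)
    -- the sorted key list decomposes as a :: (sorted keys of d)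
    have hkeys : PySem.List.sorted (PySem.Set.ofList (a :: rest)) (fun x => x) false
        = a :: PySem.List.sorted (PySem.Set.ofList d) (fun x => x) false := by
      apply PySem.List.sorted_eq_of_perm_of_pairwise_lt
      · -- permutation
        have h1 : (PySem.List.sorted (PySem.Set.ofList d) (fun x => x) false).Perm
            (PySem.Set.ofList d) := PySem.List.sorted_perm ..
        refine ((h1.cons a).trans ?_)
        rw [List.perm_ext_iff_of_nodup]
        · intro x
          simp only [List.mem_cons, PySem.Set.mem_ofList, hrest, List.mem_append]
          constructor
          · rintro (rfl | h) <;> tauto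
          · rintro (rfl | h | h)
            · left; rfl
            · left; exact htA x h
            · right; exact h
        · refine List.nodup_cons.2 ⟨?_, PySem.Set.nodup_ofList _⟩
          intro hmem
          exact absurd (hdgt a ((PySem.Set.mem_ofList _ _).1 hmem)) (lt_irrefl a)
        · exact PySem.Set.nodup_ofList _
      · -- strictly increasing
        refine List.pairwise_cons.2 ⟨?_, PySem.List.sorted_ofList_pairwise_lt ..⟩
        intro y hy
        exact hdgt y ((PySem.Set.mem_ofList _ _).1 ((PySem.List.mem_sorted ..).1 hy))
    have hcnt_a : (a :: rest).count a = 1 + t.length := by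
      have h0 : d.count a = 0 := by
        rw [List.count_eq_zero]
        intro h; exact absurd (hdgt a h) (lt_irrefl a)
      have h1 : t.count a = t.length := by
        rw [List.count_eq_length]; intro x hx; exact ((htA x hx) ▸ rfl)
      rw [List.count_cons_self, hrest, List.count_append, h0, h1]; omega
    have hcnt_k : ∀ k ∈ d, (a :: rest).count k = d.count k := by
      intro k hk
      have hka : a < k := hdgt k hk
      have h1 : t.count k = 0 := by
        rw [List.count_eq_zero]
        intro h; exact absurd ((htA k h) ▸ hka) (lt_irrefl a)
      rw [List.count_cons_of_ne (by intro h; exact absurd (h ▸ hka) (lt_irrefl a)),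
        hrest, List.count_append, h1]; omega
    rw [hkeys, List.map_cons]
    have hlen : d.length < rest.length + 1 :=
      Nat.lt_succ_of_le (List.length_dropWhile_le _ _)
    rw [show pvRunsB (a :: rest)
        = (PySem.Int.toStr (((1 + t.length : Nat) : Int)) ++ a) :: pvRunsB d from by
      rw [pvRunsB]]
    congr 1
    · rw [hcnt_a]
    · rw [← pv_runs_eq d hdp]
      apply List.map_congr_left
      intro k hk
      rw [hcnt_k k ((PySem.Set.mem_ofList _ _).1 ((PySem.List.mem_sorted ..).1 hk))]
termination_by s => s.length
decreasing_by
  have := List.length_dropWhile_le (fun x => x == a) rest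
  simp only [List.length_cons]; omega

-- ===== VERDICT (by name: the statement is the Claim_ definition above) =====
theorem get_shorter_tuple_with_counter_spec : Claim_equal_get_shorter_tuple_with_counter := by
  intro xs _
  unfold Spec_get_shorter_tuple_with_counter get_shorter_tuple_with_counter
    get_shorter_tuple_with_counter_alt
  simp only []
  rw [show xs.foldl (fun d fam => d.modify fam 0 (· + 1)) PySem.Dict.empty
      = PySem.Dict.counter xs from (PySem.Dict.counter_eq_foldl xs).symm]
  rw [PySem.Dict.keys_counter]
  rw [PySem.List.foldl_append_singleton_eq_map]
  simp only [PySem.Dict.getD_counter]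
  set s := PySem.List.sorted xs (fun x => x) false with hsdef
  have hperm : s.Perm xs := PySem.List.sorted_perm ..
  have hof : (PySem.Set.ofList xs).Perm (PySem.Set.ofList s) := by
    rw [List.perm_ext_iff_of_nodup (PySem.Set.nodup_ofList _) (PySem.Set.nodup_ofList _)]
    intro x
    simp only [PySem.Set.mem_ofList]
    exact ⟨fun h => hperm.mem_iff.2 h, fun h => hperm.mem_iff.1 h⟩
  rw [PySem.List.sorted_eq_sorted_of_perm _ _ _ (fun a b h => h) hof]
  rw [← pv_runs_eq s (PySem.List.sorted_pairwise ..)]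
  apply List.map_congr_left
  intro k _
  rw [hperm.count_eq]
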